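-- pv_equiv track=rewrite | github.com/rmkujala/brainnets | fname_conventions.py | extract_basename
-- ===== SOURCE A (Python) =====
-- def extract_basename(fname):
--     """
--     Extracts the basename of a filename, which can be used as a prefix for
--     resulting data files. Allows also for "." in the basename.
--
--     Parameters
--     ----------
--     fname : str
--
--     Returns
--     -------
--     basename : str
--
--
--     Examples
--     --------
--
--     >>> fname = "foo/bar/foo.bar.tadaa"
--     >>> extract_basename(fname)
--     'foo.bar'
--
--     """
--     splitted = fname.split("/")[-1].split(".")[:-1]
--     basename = ""
--     for i, s in enumerate(splitted):
--         if i >= 1: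
--             basename += "."
--         basename += s
--     return basename
-- ===== SOURCE B (Python) =====
-- def extract_basename(fname):
--     last = fname.split('/')[-1]
--     stem_rev = []
--     seen = False
--     for ch in reversed(last):
--         if seen:
--             stem_rev.append(ch)
--         elif ch == '.':
--             seen = True
--     return ''.join(reversed(stem_rev)) if seen else ''
-- ===== Notes on version B (the rewrite author's own statement) =====
-- stated objective: alternative
-- what changed: Instead of splitting the last path component on '.', dropping the final token and rebuilding the name with a concatenation loop, B makes a single reverse scan of the last component that collects the characters before its final dot (returning '' when there is none).
import Mathlib
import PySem

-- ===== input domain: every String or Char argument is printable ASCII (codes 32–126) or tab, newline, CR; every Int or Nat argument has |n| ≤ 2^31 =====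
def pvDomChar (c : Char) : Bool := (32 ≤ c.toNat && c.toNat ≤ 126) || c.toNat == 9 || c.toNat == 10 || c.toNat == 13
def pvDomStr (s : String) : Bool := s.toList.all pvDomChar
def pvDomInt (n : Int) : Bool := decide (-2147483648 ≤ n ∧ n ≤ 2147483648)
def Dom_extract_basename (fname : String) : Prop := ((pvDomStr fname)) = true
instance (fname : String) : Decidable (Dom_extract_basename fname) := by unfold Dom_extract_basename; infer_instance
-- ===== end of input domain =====

-- B replaces A's split-on-'.'/drop-last/rebuild loop by a single reverse scan of the
-- last path component collecting the characters before its final dot (objective: alternative).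

-- ===== PORT A =====
-- splitted = fname.split("/")[-1].split(".")[:-1]; then the enumerate loop joins with "."
def extract_basename (fname : String) : String :=
  let last := (PySem.List.pyGet? (PySem.Chars.splitOn fname.toList ['/']) (-1)).getD []
  let splitted := PySem.List.slice (PySem.Chars.splitOn last ['.']) none (some (-1))
  let basename := (PySem.List.enumerate splitted 0).foldl
    (fun acc p => (if p.1 ≥ 1 then acc ++ ['.'] else acc) ++ p.2) ([] : List Char)
  String.ofList basename

-- ===== PORT B =====
-- last = fname.split('/')[-1]; reverse scan: after the first '.' seen, collect chars
def extract_basename_alt (fname : String) : String :=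
  let last := (PySem.List.pyGet? (PySem.Chars.splitOn fname.toList ['/']) (-1)).getD []
  let p := last.reverse.foldl
    (fun st ch => if st.2 then (st.1 ++ [ch], st.2) else if ch = '.' then (st.1, true) else st)
    (([] : List Char), false)
  if p.2 then String.ofList p.1.reverse else ""

-- ===== PRECONDITION & SPEC =====
def Spec_extract_basename (fname : String) (out : String) : Prop := out = extract_basename_alt fname
instance (fname : String) (out : String) : Decidable (Spec_extract_basename fname out) := by unfold Spec_extract_basename; infer_instance

-- ===== CLAIM (what is proved, stated in full; the proofs are below) =====
def Claim_equal_extract_basename : Prop := ∀ (fname : String), Dom_extract_basename fname → Spec_extract_basename fname (extract_basename fname)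

-- ===== LEMMAS AND PROOFS =====


-- proof-only helpers: structural split-on-'.' (spc), basename-before-last-dot (stem)
def spc : List Char → List (List Char)
  | [] => [[]]
  | c :: rest => if c = '.' then [] :: spc rest else (c :: (spc rest).headI) :: (spc rest).tail

lemma spc_ne_nil (cs : List Char) : spc cs ≠ [] := by
  cases cs with
  | nil => simp [spc]
  | cons c rest => by_cases h : c = '.' <;> simp [spc, h]

lemma spc_headI_tail (cs : List Char) : (spc cs).headI :: (spc cs).tail = spc cs := by
  cases hsp : spc cs with
  | nil => exact absurd hsp (spc_ne_nil cs)
  | cons hh tt => simp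

lemma go_dot_spec : ∀ (fuel : Nat) (l cur : List Char) (accs : List (List Char)),
    l.length < fuel →
    PySem.Chars.splitOn.go ['.'] fuel l cur accs =
      accs.reverse ++ (cur.reverse ++ (spc l).headI) :: (spc l).tail := by
  intro fuel
  induction fuel with
  | zero => intro l cur accs h; omega
  | succ n ih =>
    intro l cur accs h
    cases l with
    | nil => simp [PySem.Chars.splitOn.go, spc]
    | cons c rest =>
      rw [PySem.Chars.splitOn.go]
      by_cases hc : c = '.'
      · have hpre : ['.'].isPrefixOf (c :: rest) = true := by simp [hc, List.isPrefixOf]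
        simp only [hpre, if_pos, List.length_cons] at *
        rw [show List.drop ([].length + 1) (c :: rest) = rest by simp, ih rest [] (cur.reverse :: accs) (by omega)]
        simp [spc, hc, spc_headI_tail]
      · have hpre : ['.'].isPrefixOf (c :: rest) = false := by
          simp [List.isPrefixOf]; exact fun h => absurd h.symm hc
        simp only [hpre, Bool.false_eq_true, if_false] at *
        rw [ih rest (c :: cur) accs (by simp at h ⊢; omega)]
        simp only [spc, hc, if_false]
        simp

lemma splitOn_dot (l : List Char) : PySem.Chars.splitOn l ['.'] = spc l := by
  show PySem.Chars.splitOn.go ['.'] (l.length + 1) l [] [] = spc l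
  rw [go_dot_spec (l.length + 1) l [] [] (by omega)]
  simp [spc_headI_tail]

-- everything before the last '.' of cs, none when cs has no '.'
def stem : List Char → Option (List Char)
  | [] => none
  | c :: rest =>
    match stem rest with
    | some t => some (c :: t)
    | none => if c = '.' then some [] else none

def AJ : List (List Char) → List Char
  | [] => []
  | p :: ps => p ++ ps.flatMap (fun q => '.' :: q)

lemma enum_fold (ps : List (List Char)) : ∀ (s : Int) (acc : List Char), 1 ≤ s →
    (PySem.List.enumerate ps s).foldl
      (fun acc p => (if p.1 ≥ 1 then acc ++ ['.'] else acc) ++ p.2) acc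
      = acc ++ ps.flatMap (fun q => '.' :: q) := by
  induction ps with
  | nil => intro s acc _; simp [PySem.List.enumerate_nil]
  | cons p ps ih =>
    intro s acc hs
    rw [PySem.List.enumerate_cons, List.foldl_cons, ih (s+1) _ (by omega)]
    simp [hs, ge_iff_le]

lemma loopA (ps : List (List Char)) :
    (PySem.List.enumerate ps 0).foldl
      (fun acc p => (if p.1 ≥ 1 then acc ++ ['.'] else acc) ++ p.2) [] = AJ ps := by
  cases ps with
  | nil => simp [PySem.List.enumerate_nil, AJ]
  | cons p ps =>
    rw [PySem.List.enumerate_cons, List.foldl_cons,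
      show ((0:Int)+1) = 1 by norm_num, enum_fold ps 1 _ (by omega)]
    simp [AJ]

lemma AJ_cons_dot (ps : List (List Char)) (h : ps ≠ []) : AJ ([] :: ps) = '.' :: AJ ps := by
  cases ps with
  | nil => simp at h
  | cons q qs => simp [AJ]

lemma AJ_cons_char (c : Char) (h : List Char) (ps : List (List Char)) :
    AJ ((c :: h) :: ps) = c :: AJ (h :: ps) := by simp [AJ]

lemma A_stem : ∀ cs : List Char,
    (stem cs = none → spc cs = [cs]) ∧
    (∀ t, stem cs = some t → AJ ((spc cs).dropLast) = t ∧ (spc cs).tail ≠ []) := by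
  intro cs
  induction cs with
  | nil => constructor
           · intro _; simp [spc]
           · intro t ht; simp [stem] at ht
  | cons c rest ih =>
    obtain ⟨ih1, ih2⟩ := ih
    by_cases hc : c = '.'
    · cases hr : stem rest with
      | none =>
        refine ⟨fun h => ?_, fun t ht => ?_⟩
        · simp [stem, hr, hc] at h
        · have hsp := ih1 hr
          simp [stem, hr, hc] at ht
          simp [spc, hc, hsp, AJ, ← ht]
      | some t' =>
        refine ⟨fun h => ?_, fun t ht => ?_⟩
        · simp [stem, hr] at h
        · simp [stem, hr, hc] at ht
          obtain ⟨hAJ, htail⟩ := ih2 t' hr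
          cases hsp : spc rest with
          | nil => exact absurd hsp (spc_ne_nil rest)
          | cons hh tt =>
            rw [hsp] at htail hAJ
            simp at htail
            cases tt with
            | nil => simp at htail
            | cons t1 ts =>
              simp only [spc, hc, if_pos, hsp, List.dropLast_cons₂]
              rw [List.dropLast_cons₂] at hAJ
              rw [AJ_cons_dot _ (by simp)]
              rw [hAJ]
              exact ⟨ht, by simp⟩
    · cases hr : stem rest with
      | none =>
        refine ⟨fun h => ?_, fun t ht => ?_⟩
        · have hsp := ih1 hr
          simp [spc, hc, hsp]
        · simp [stem, hr, hc] at ht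
      | some t' =>
        refine ⟨fun h => ?_, fun t ht => ?_⟩
        · simp [stem, hr] at h
        · simp [stem, hr] at ht
          obtain ⟨hAJ, htail⟩ := ih2 t' hr
          cases hsp : spc rest with
          | nil => exact absurd hsp (spc_ne_nil rest)
          | cons hh tt =>
            rw [hsp] at htail hAJ
            simp at htail
            cases tt with
            | nil => simp at htail
            | cons t1 ts =>
              simp only [spc, hsp, List.headI_cons, List.tail_cons, hc,
                if_false, List.dropLast_cons₂]
              rw [List.dropLast_cons₂] at hAJ
              rw [AJ_cons_char, hAJ, ← ht]
              constructor
              · rfl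
              · simp

lemma fB_seen (l : List Char) : ∀ acc : List Char,
    l.foldl (fun st ch => if st.2 then (st.1 ++ [ch], st.2)
      else if ch = '.' then (st.1, true) else st) (acc, true) = (acc ++ l, true) := by
  induction l with
  | nil => intro acc; simp
  | cons c cs ih => intro acc; simp [ih]

lemma stem_snoc_dot : ∀ ys : List Char, stem (ys ++ ['.']) = some ys := by
  intro ys
  induction ys with
  | nil => simp [stem]
  | cons y ys ih => simp [stem, ih]

lemma stem_snoc_ne (d : Char) (hd : d ≠ '.') : ∀ ys : List Char, stem (ys ++ [d]) = stem ys := by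
  intro ys
  induction ys with
  | nil => simp [stem, hd]
  | cons y ys ih =>
    simp only [List.cons_append, stem, ih]

lemma B_fold : ∀ rs acc : List Char,
    rs.foldl (fun st ch => if st.2 then (st.1 ++ [ch], st.2)
      else if ch = '.' then (st.1, true) else st) (acc, false)
      = match stem rs.reverse with
        | none => (acc, false)
        | some t => (acc ++ t.reverse, true) := by
  intro rs
  induction rs with
  | nil => intro acc; simp [stem]
  | cons c rest ih =>
    intro acc
    by_cases hc : c = '.'
    · simp only [List.foldl_cons, hc, if_pos, Bool.false_eq_true, if_false, fB_seen,
        List.reverse_cons, stem_snoc_dot]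
      simp
    · simp only [List.foldl_cons, Bool.false_eq_true, if_false, hc, ih,
        List.reverse_cons, stem_snoc_ne c hc]

-- ===== VERDICT (by name: the statement is the Claim_ definition above) =====
theorem extract_basename_spec : Claim_equal_extract_basename := by
  intro fname _
  unfold Spec_extract_basename
  simp only [extract_basename, extract_basename_alt]
  generalize (PySem.List.pyGet? (PySem.Chars.splitOn fname.toList ['/']) (-1)).getD [] = last
  rw [splitOn_dot last]
  rw [show PySem.List.slice (spc last) none (some (-1)) = (spc last).dropLast by simp [pysem]]
  rw [loopA]
  rw [B_fold last.reverse []]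
  cases hst : stem last with
  | none =>
    have hsp := (A_stem last).1 hst
    simp only [List.reverse_reverse, hst, hsp]
    rfl
  | some t =>
    obtain ⟨hAJ, _⟩ := (A_stem last).2 t hst
    simp only [List.reverse_reverse, hst, hAJ]
    simp
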